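-- pv_equiv track=rewrite | github.com/Kyotay-12/rbp-evolution-analysis | scripts/analyze_correlations.py | calc_tf_family_diversity
-- ===== SOURCE A (Python) =====
-- SPECIES_ORDER = [
--     "Caenorhabditis_elegans",
--     "Drosophila_melanogaster",
--     "Danio_rerio",
--     "Xenopus_tropicalis",
--     "Mus_musculus",
--     "Homo_sapiens",
-- ]
--
-- def calc_tf_family_diversity(tf_rows):
--     """Count distinct tf_family values per species."""
--     result = {}
--     for sp in SPECIES_ORDER:
--         sp_rows  = [r for r in tf_rows if r.get("species", "").strip() == sp]
--         families = set()
--         for r in sp_rows: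
--             fam = r.get("tf_family", "").strip()
--             if fam:
--                 families.add(fam)
--         result[sp] = {"n_proteins": len(sp_rows), "n_families": len(families)}
--     return result
-- ===== SOURCE B (Python) =====
-- SPECIES_ORDER = [
--     "Caenorhabditis_elegans",
--     "Drosophila_melanogaster",
--     "Danio_rerio",
--     "Xenopus_tropicalis",
--     "Mus_musculus",
--     "Homo_sapiens",
-- ]
--
-- def calc_tf_family_diversity(tf_rows):
--     """Count distinct tf_family values per species (one grouping pass)."""
--     acc = {sp: (0, set()) for sp in SPECIES_ORDER}
--     for r in tf_rows:
--         sp = r.get("species", "").strip()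
--         if sp in acc:
--             n, fams = acc[sp]
--             fam = r.get("tf_family", "").strip()
--             if fam:
--                 fams = fams | {fam}
--             acc[sp] = (n + 1, fams)
--     return {sp: {"n_proteins": n, "n_families": len(fams)}
--             for sp, (n, fams) in acc.items()}
-- ===== Notes on version B (the rewrite author's own statement) =====
-- stated objective: alternative
-- what changed: Replaces six repeated filtering scans over tf_rows (one per species) with a single grouping pass that maintains a per-species (count, family-set) accumulator pre-seeded in SPECIES_ORDER order.
import Mathlib
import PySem

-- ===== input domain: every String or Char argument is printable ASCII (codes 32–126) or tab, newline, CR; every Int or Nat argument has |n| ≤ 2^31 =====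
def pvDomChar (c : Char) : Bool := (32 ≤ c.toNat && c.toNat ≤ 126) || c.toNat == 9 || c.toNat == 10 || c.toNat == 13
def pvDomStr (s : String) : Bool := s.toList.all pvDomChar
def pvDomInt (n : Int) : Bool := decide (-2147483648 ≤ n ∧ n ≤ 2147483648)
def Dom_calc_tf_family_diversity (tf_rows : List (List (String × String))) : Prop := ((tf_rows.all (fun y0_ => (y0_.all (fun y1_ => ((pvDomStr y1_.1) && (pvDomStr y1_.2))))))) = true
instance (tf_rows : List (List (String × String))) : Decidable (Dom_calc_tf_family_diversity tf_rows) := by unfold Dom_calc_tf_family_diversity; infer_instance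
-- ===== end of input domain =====

-- B groups in ONE pass over tf_rows (per-species counter + family set, pre-seeded in
-- SPECIES_ORDER order) instead of A's per-species filtering scans — an alternative
-- decomposition of the same computation.

def pvSpeciesOrder : List String :=
  ["Caenorhabditis_elegans", "Drosophila_melanogaster", "Danio_rerio",
   "Xenopus_tropicalis", "Mus_musculus", "Homo_sapiens"]

-- ===== PORT A =====
def calc_tf_family_diversity (tf_rows : List (List (String × String))) : List (String × List (String × Int)) :=
  (pvSpeciesOrder.foldl (fun result sp =>
      let sp_rows := tf_rows.filter
        (fun r => PySem.Str.strip ((PySem.Dict.mk r).getD "species" "") == sp)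
      let families : PySem.Set String := sp_rows.foldl (fun fams r =>
          let fam := PySem.Str.strip ((PySem.Dict.mk r).getD "tf_family" "")
          if fam ≠ "" then PySem.Set.add fams fam else fams) PySem.Set.empty
      result.insert sp [("n_proteins", (sp_rows.length : Int)),
                        ("n_families", (families.length : Int))])
    PySem.Dict.empty).items

-- ===== PORT B =====
def pvStepB (d : PySem.Dict String (Int × PySem.Set String)) (r : List (String × String)) :
    PySem.Dict String (Int × PySem.Set String) :=
  let sp := PySem.Str.strip ((PySem.Dict.mk r).getD "species" "")
  if d.contains sp then
    let p := d.getD sp (0, PySem.Set.empty)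
    let fam := PySem.Str.strip ((PySem.Dict.mk r).getD "tf_family" "")
    let fams := if fam ≠ "" then PySem.Set.add p.2 fam else p.2
    d.insert sp (p.1 + 1, fams)
  else d

def calc_tf_family_diversity_alt (tf_rows : List (List (String × String))) : List (String × List (String × Int)) :=
  let acc0 : PySem.Dict String (Int × PySem.Set String) :=
    pvSpeciesOrder.foldl (fun d sp => d.insert sp ((0 : Int), (PySem.Set.empty : PySem.Set String)))
      PySem.Dict.empty
  let acc := tf_rows.foldl pvStepB acc0
  acc.items.map (fun p => (p.1, [("n_proteins", p.2.1), ("n_families", (p.2.2.length : Int))]))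

-- ===== PRECONDITION & SPEC =====
def Spec_calc_tf_family_diversity (tf_rows : List (List (String × String))) (out : List (String × List (String × Int))) : Prop := out = calc_tf_family_diversity_alt tf_rows
instance (tf_rows : List (List (String × String))) (out : List (String × List (String × Int))) : Decidable (Spec_calc_tf_family_diversity tf_rows out) := by unfold Spec_calc_tf_family_diversity; infer_instance

-- ===== CLAIM (what is proved, stated in full; the proofs are below) =====
def Claim_equal_calc_tf_family_diversity : Prop := ∀ (tf_rows : List (List (String × String))), Dom_calc_tf_family_diversity tf_rows → Spec_calc_tf_family_diversity tf_rows (calc_tf_family_diversity tf_rows)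

-- ===== LEMMAS AND PROOFS =====

-- the seed dictionary of B, and its literal keys
def pvAcc0 : PySem.Dict String (Int × PySem.Set String) :=
  pvSpeciesOrder.foldl (fun d sp => d.insert sp ((0 : Int), (PySem.Set.empty : PySem.Set String)))
    PySem.Dict.empty

lemma pvAcc0_keys : pvAcc0.keys = pvSpeciesOrder := by decide

-- B's loop never changes the key list
lemma pvStepB_keys (rows : List (List (String × String)))
    (d : PySem.Dict String (Int × PySem.Set String)) :
    (rows.foldl pvStepB d).keys = d.keys := by
  induction rows generalizing d with
  | nil => rfl
  | cons r rest ih =>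
    simp only [List.foldl_cons]
    rw [ih]
    unfold pvStepB
    by_cases h : d.contains (PySem.Str.strip ((PySem.Dict.mk r).getD "species" "")) = true
    · simp only [h, if_true]
      exact PySem.Dict.keys_insert_of_contains _ _ h
    · simp only [Bool.not_eq_true] at h
      simp [h]

-- the per-key value after B's one pass is the fold over the rows of that species
lemma pvStepB_getD (rows : List (List (String × String)))
    (d : PySem.Dict String (Int × PySem.Set String)) (sp : String)
    (hc : d.contains sp = true) :
    (rows.foldl pvStepB d).getD sp (0, PySem.Set.empty)
      = (rows.filter (fun r => PySem.Str.strip ((PySem.Dict.mk r).getD "species" "") == sp)).foldl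
          (fun p r =>
            (p.1 + 1,
             if PySem.Str.strip ((PySem.Dict.mk r).getD "tf_family" "") ≠ ""
             then PySem.Set.add p.2 (PySem.Str.strip ((PySem.Dict.mk r).getD "tf_family" "")) else p.2))
          (d.getD sp (0, PySem.Set.empty)) := by
  induction rows generalizing d with
  | nil => rfl
  | cons r rest ih =>
    simp only [List.foldl_cons, List.filter_cons]
    by_cases hk : PySem.Str.strip ((PySem.Dict.mk r).getD "species" "") = sp
    · subst hk
      simp only [beq_self_eq_true, if_true, List.foldl_cons]
      have hstep : pvStepB d r
          = d.insert (PySem.Str.strip ((PySem.Dict.mk r).getD "species" ""))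
              ((d.getD (PySem.Str.strip ((PySem.Dict.mk r).getD "species" "")) (0, PySem.Set.empty)).1 + 1,
               let fam := PySem.Str.strip ((PySem.Dict.mk r).getD "tf_family" "")
               if fam ≠ "" then
                 PySem.Set.add (d.getD (PySem.Str.strip ((PySem.Dict.mk r).getD "species" "")) (0, PySem.Set.empty)).2 fam
               else (d.getD (PySem.Str.strip ((PySem.Dict.mk r).getD "species" "")) (0, PySem.Set.empty)).2) := by
        unfold pvStepB; simp [hc]
      rw [hstep, ih _ (by simp [PySem.Dict.contains_insert_self]),
          PySem.Dict.getD_insert_self]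
    · have hb : (PySem.Str.strip ((PySem.Dict.mk r).getD "species" "") == sp) = false := by
        simpa using hk
      simp only [hb, Bool.false_eq_true, if_false]
      by_cases h : d.contains (PySem.Str.strip ((PySem.Dict.mk r).getD "species" "")) = true
      · have hstep : pvStepB d r
            = d.insert (PySem.Str.strip ((PySem.Dict.mk r).getD "species" ""))
                ((d.getD (PySem.Str.strip ((PySem.Dict.mk r).getD "species" "")) (0, PySem.Set.empty)).1 + 1,
                 let fam := PySem.Str.strip ((PySem.Dict.mk r).getD "tf_family" "")
                 if fam ≠ "" then
                   PySem.Set.add (d.getD (PySem.Str.strip ((PySem.Dict.mk r).getD "species" "")) (0, PySem.Set.empty)).2 fam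
                 else (d.getD (PySem.Str.strip ((PySem.Dict.mk r).getD "species" "")) (0, PySem.Set.empty)).2) := by
          unfold pvStepB; simp [h]
        rw [hstep, ih _ (by simp [PySem.Dict.contains_insert, hc]),
            PySem.Dict.getD_insert_of_ne _ _ _ (fun he => hk he.symm)]
      · have hstep : pvStepB d r = d := by
          unfold pvStepB
          simp only [Bool.not_eq_true] at h
          simp [h]
        rw [hstep, ih _ hc]

-- counting loop gives the length
lemma pvFoldlCount {α : Type} (l : List α) (a : Int) :
    l.foldl (fun n (_ : α) => n + 1) a = a + l.length := by
  induction l generalizing a with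
  | nil => simp
  | cons x t ih => simp [ih]; ring

-- ===== VERDICT (by name: the statement is the Claim_ definition above) =====
theorem calc_tf_family_diversity_spec : Claim_equal_calc_tf_family_diversity := by
  intro tf_rows _
  unfold Spec_calc_tf_family_diversity calc_tf_family_diversity calc_tf_family_diversity_alt
  dsimp only []
  rw [show (pvSpeciesOrder.foldl (fun d sp => d.insert sp ((0 : Int), (PySem.Set.empty : PySem.Set String))) PySem.Dict.empty) = pvAcc0 from rfl]
  -- A's side: a fold of fresh distinct inserts is an append of items
  have hA := PySem.Dict.items_foldl_insert_fresh (d := PySem.Dict.empty)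
        (l := pvSpeciesOrder) (k := fun sp => sp)
        (v := fun sp =>
          [("n_proteins", ((tf_rows.filter (fun r => PySem.Str.strip ((PySem.Dict.mk r).getD "species" "") == sp)).length : Int)),
           ("n_families", (((tf_rows.filter (fun r => PySem.Str.strip ((PySem.Dict.mk r).getD "species" "") == sp)).foldl
             (fun fams r =>
               if PySem.Str.strip ((PySem.Dict.mk r).getD "tf_family" "") ≠ ""
               then PySem.Set.add fams (PySem.Str.strip ((PySem.Dict.mk r).getD "tf_family" "")) else fams) PySem.Set.empty).length : Int))])
        (by intro a _; rfl) (by decide)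
  dsimp only [] at hA
  rw [hA]
  -- B's side: items = keys paired with their values
  have hnd : (tf_rows.foldl pvStepB pvAcc0).keys.Nodup := by
    rw [pvStepB_keys, pvAcc0_keys]; decide
  rw [PySem.Dict.items_eq_map_keys _ hnd (0, PySem.Set.empty), pvStepB_keys, pvAcc0_keys,
      List.map_map]
  simp only [show PySem.Dict.empty.items = ([] : List (String × List (String × Int))) from rfl, List.nil_append]
  apply List.map_congr_left
  intro sp hsp
  have hc : pvAcc0.contains sp = true := by
    rw [PySem.Dict.contains_iff_mem_keys, pvAcc0_keys]; exact hsp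
  have h0 : pvAcc0.getD sp (0, PySem.Set.empty) = (0, PySem.Set.empty) := by
    fin_cases hsp <;> decide
  rw [Function.comp_apply, pvStepB_getD tf_rows pvAcc0 sp hc, h0]
  rw [PySem.List.foldl_prod_mk
        (f := fun (n : Int) (_ : List (String × String)) => n + 1)
        (g := fun (fams : PySem.Set String) (r : List (String × String)) =>
          if PySem.Str.strip ((PySem.Dict.mk r).getD "tf_family" "") ≠ ""
          then PySem.Set.add fams (PySem.Str.strip ((PySem.Dict.mk r).getD "tf_family" "")) else fams)]
  rw [pvFoldlCount]
  simp [PySem.Set.empty]
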